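-- pv_equiv track=rewrite | github.com/lblanes25/QAStudio2 | qa_analytics/core/excel_utils.py | extract_string_literals
-- ===== SOURCE A (Python) =====
-- from typing import Dict, List, Set, Tuple, Optional, Any
--
-- def extract_string_literals(text: str, literals_dict: Optional[Dict[str, str]] = None) -> str:
--     """
--     Extract string literals from text and replace with placeholders.
--
--     Args:
--         text: Text to process
--         literals_dict: Dictionary to store extracted literals
--
--     Returns:
--         Text with string literals replaced by placeholders
--     """
--     if literals_dict is None:
--         literals_dict = {}
--
--     result = ""
--     in_string = False
--     current_string = ""
--     i = 0
--
--     while i < len(text):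
--         char = text[i]
--
--         if char == '"' and (i == 0 or text[i-1] != '\\'):
--             if in_string:
--                 # End of string, store it
--                 placeholder = f"__STRING{len(literals_dict)}__"
--                 literals_dict[placeholder] = current_string
--                 result += placeholder
--                 current_string = ""
--             else:
--                 # Start of string
--                 current_string = ""
--             in_string = not in_string
--             i += 1
--         elif in_string:
--             if char == '\\' and i + 1 < len(text) and text[i+1] == '"':
--                 # Escaped quote
--                 current_string += '"'
--                 i += 2
--             else:
--                 current_string += char
--                 i += 1
--         else:
--             result += char
--             i += 1
--
--     return result
-- ===== SOURCE B (Python) =====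
-- def _next_unescaped_quote(text, i):
--     """Index of the first '"' at or after i that is not preceded by a backslash, or -1."""
--     while i < len(text):
--         if text[i] == '"' and (i == 0 or text[i - 1] != '\\'):
--             return i
--         i += 1
--     return -1
--
--
-- def extract_string_literals(text, literals_dict=None):
--     if literals_dict is None:
--         literals_dict = {}
--     parts = []
--     i = 0
--     while True:
--         start = _next_unescaped_quote(text, i)
--         if start == -1:
--             parts.append(text[i:])
--             break
--         parts.append(text[i:start])
--         end = _next_unescaped_quote(text, start + 1)
--         if end == -1:
--             break  # unterminated literal: dropped, like the original
--         placeholder = f"__STRING{len(literals_dict)}__"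
--         literals_dict[placeholder] = text[start + 1:end].replace('\\"', '"')
--         parts.append(placeholder)
--         i = end + 1
--     return "".join(parts)
-- ===== Notes on version B (the rewrite author's own statement) =====
-- stated objective: simpler
-- what changed: Replaced the char-by-char in_string state machine with a helper that finds the next unescaped quote, assembling the output from slices, str.replace for unescaping \" in literal bodies, and a final join.
import Mathlib
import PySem

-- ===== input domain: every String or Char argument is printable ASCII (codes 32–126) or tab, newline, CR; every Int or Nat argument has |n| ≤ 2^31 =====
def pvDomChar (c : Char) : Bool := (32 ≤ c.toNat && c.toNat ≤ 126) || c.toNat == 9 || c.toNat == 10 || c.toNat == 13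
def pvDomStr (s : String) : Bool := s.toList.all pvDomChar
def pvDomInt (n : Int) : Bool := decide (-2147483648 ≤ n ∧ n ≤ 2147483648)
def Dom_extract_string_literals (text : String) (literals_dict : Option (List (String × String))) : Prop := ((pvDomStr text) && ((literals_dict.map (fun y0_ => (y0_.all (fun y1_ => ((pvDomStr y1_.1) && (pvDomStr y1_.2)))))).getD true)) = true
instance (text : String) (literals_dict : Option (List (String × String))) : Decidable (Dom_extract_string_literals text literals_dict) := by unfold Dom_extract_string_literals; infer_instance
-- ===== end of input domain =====

-- B replaces A's char-by-char in_string state machine by a quote-finding helper plus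
-- slice/replace/join assembly (objective: simpler).  Both A and B mutate literals_dict
-- identically; the equivalence proved here is about the RETURN value.
-- (Loops are ported with a fuel parameter — fuel only makes the recursion structural,
-- each port runs out of input before it runs out of fuel.)

-- placeholder f"__STRING{n}__" (shared literal formatting of both sources)
def phChars (n : Nat) : List Char := "__STRING".toList ++ PySem.Int.toChars (n : Int) ++ "__".toList

-- ===== PORT A =====
-- the while-loop of A: state (i, in_string, current_string, result, literals_dict)
def goA (cs : List Char) : Nat → Nat → Bool → List Char → List Char →
    PySem.Dict String String → List Char
  | 0, _, _, _, res, _ => res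
  | fuel+1, i, inStr, cur, res, d =>
    if h : i < cs.length then
      let c := cs[i]
      if c = '"' ∧ (i = 0 ∨ cs[i-1]? ≠ some '\\') then
        if inStr then
          let ph := phChars d.size
          goA cs fuel (i+1) false [] (res ++ ph) (d.insert (String.ofList ph) (String.ofList cur))
        else
          goA cs fuel (i+1) true [] res d
      else if inStr then
        if c = '\\' ∧ i + 1 < cs.length ∧ cs[i+1]? = some '"' then
          goA cs fuel (i+2) inStr (cur ++ ['"']) res d
        else
          goA cs fuel (i+1) inStr (cur ++ [c]) res d
      else
        goA cs fuel (i+1) inStr cur (res ++ [c]) d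
    else res

def extract_string_literals (text : String) (literals_dict : Option (List (String × String))) : String :=
  String.ofList (goA text.toList text.toList.length 0 false [] []
    (PySem.Dict.ofList (literals_dict.getD [])))

-- ===== PORT B =====
-- port of _next_unescaped_quote (returns -1 like the Python helper)
def nextUQgo (cs : List Char) : Nat → Nat → Int
  | 0, _ => -1
  | fuel+1, i =>
    if h : i < cs.length then
      if cs[i] = '"' ∧ (i = 0 ∨ cs[i-1]? ≠ some '\\') then (i : Int)
      else nextUQgo cs fuel (i+1)
    else -1

def nextUQ (cs : List Char) (i : Nat) : Int := nextUQgo cs cs.length i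

-- the while-loop of B: state (i, parts, literals_dict); ''.join(parts) = parts.flatten
def goB (cs : List Char) : Nat → Nat → List (List Char) → PySem.Dict String String → List Char
  | 0, i, parts, _ => (parts ++ [PySem.List.slice cs (some (i : Int)) none]).flatten
  | fuel+1, i, parts, d =>
    if _hs : nextUQ cs i = -1 then
      (parts ++ [PySem.List.slice cs (some (i : Int)) none]).flatten
    else
      let st := (nextUQ cs i).toNat
      let parts1 := parts ++ [PySem.List.slice cs (some (i : Int)) (some (st : Int))]
      if _he : nextUQ cs (st + 1) = -1 then
        parts1.flatten
      else
        let en := (nextUQ cs (st + 1)).toNat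
        let ph := phChars d.size
        let body := PySem.Chars.replace
          (PySem.List.slice cs (some ((st + 1 : Nat) : Int)) (some ((en : Nat) : Int)))
          ['\\', '"'] ['"']
        goB cs fuel (en + 1) (parts1 ++ [ph]) (d.insert (String.ofList ph) (String.ofList body))

def extract_string_literals_alt (text : String) (literals_dict : Option (List (String × String))) : String :=
  String.ofList (goB text.toList text.toList.length 0 []
    (PySem.Dict.ofList (literals_dict.getD [])))

-- ===== PRECONDITION & SPEC =====
def Spec_extract_string_literals (text : String) (literals_dict : Option (List (String × String))) (out : String) : Prop := out = extract_string_literals_alt text literals_dict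
instance (text : String) (literals_dict : Option (List (String × String))) (out : String) : Decidable (Spec_extract_string_literals text literals_dict out) := by unfold Spec_extract_string_literals; infer_instance

-- ===== CLAIM (what is proved, stated in full; the proofs are below) =====
def Claim_equal_extract_string_literals : Prop := ∀ (text : String) (literals_dict : Option (List (String × String))), Dom_extract_string_literals text literals_dict → Spec_extract_string_literals text literals_dict (extract_string_literals text literals_dict)

-- ===== LEMMAS AND PROOFS =====

-- fuel irrelevance: any fuel covering the remaining input computes the same value
theorem nextUQgo_fuel (cs : List Char) : ∀ (f1 f2 i : Nat),
    cs.length ≤ i + f1 → cs.length ≤ i + f2 → nextUQgo cs f1 i = nextUQgo cs f2 i := by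
  intro f1
  induction f1 with
  | zero =>
    intro f2 i h1 h2
    have hlt : ¬ i < cs.length := by omega
    cases f2 <;> simp [nextUQgo, hlt]
  | succ n ih =>
    intro f2 i h1 h2
    cases f2 with
    | zero =>
      have hlt : ¬ i < cs.length := by omega
      simp [nextUQgo, hlt]
    | succ m =>
      simp only [nextUQgo]
      by_cases hlt : i < cs.length
      · simp only [hlt, dite_true]
        by_cases hc : cs[i] = '"' ∧ (i = 0 ∨ cs[i-1]? ≠ some '\\')
        · simp [hc]
        · simp only [hc, if_false]
          exact ih m (i+1) (by omega) (by omega)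
      · simp [hlt]

theorem nextUQ_end {cs : List Char} {i : Nat} (h : ¬ i < cs.length) : nextUQ cs i = -1 := by
  unfold nextUQ
  cases hn : cs.length <;> simp [nextUQgo, h]

theorem nextUQ_hit {cs : List Char} {i : Nat} (h : i < cs.length)
    (hc : cs[i] = '"' ∧ (i = 0 ∨ cs[i-1]? ≠ some '\\')) : nextUQ cs i = (i : Int) := by
  unfold nextUQ
  cases hn : cs.length with
  | zero => omega
  | succ m => simp [nextUQgo, h, hc]

theorem nextUQ_step {cs : List Char} {i : Nat} (h : i < cs.length)
    (hc : ¬ (cs[i] = '"' ∧ (i = 0 ∨ cs[i-1]? ≠ some '\\'))) : nextUQ cs i = nextUQ cs (i+1) := by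
  unfold nextUQ
  cases hn : cs.length with
  | zero => omega
  | succ m =>
    rw [show nextUQgo cs (m+1) i = nextUQgo cs m (i+1) by simp [nextUQgo, h, hc]]
    exact nextUQgo_fuel cs m (m+1) (i+1) (by omega) (by omega)

theorem nextUQ_bounds {cs : List Char} : ∀ (k : Nat) {i : Nat}, cs.length - i ≤ k →
    nextUQ cs i ≠ -1 →
    ∃ m : Nat, nextUQ cs i = (m : Int) ∧ i ≤ m ∧ m < cs.length := by
  intro k
  induction k with
  | zero =>
    intro i hk h
    exact absurd (nextUQ_end (by omega)) h
  | succ n ih =>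
    intro i hk h
    by_cases hlt : i < cs.length
    · by_cases hc : cs[i] = '"' ∧ (i = 0 ∨ cs[i-1]? ≠ some '\\')
      · exact ⟨i, nextUQ_hit hlt hc, le_refl _, hlt⟩
      · rw [nextUQ_step hlt hc] at h ⊢
        obtain ⟨m, hm, h1, h2⟩ := ih (by omega) h
        exact ⟨m, hm, by omega, h2⟩
    · exact absurd (nextUQ_end hlt) h

-- one-step unfolding of the ports, fuel-free (any sufficient fuel recurses with itself)
theorem goA_unfold {cs : List Char} {fuel i : Nat} (hk : cs.length ≤ i + fuel)
    (inStr : Bool) (cur res : List Char) (d : PySem.Dict String String) :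
    goA cs fuel i inStr cur res d =
      if h : i < cs.length then
        let c := cs[i]
        if c = '"' ∧ (i = 0 ∨ cs[i-1]? ≠ some '\\') then
          if inStr then
            let ph := phChars d.size
            goA cs fuel (i+1) false [] (res ++ ph) (d.insert (String.ofList ph) (String.ofList cur))
          else
            goA cs fuel (i+1) true [] res d
        else if inStr then
          if c = '\\' ∧ i + 1 < cs.length ∧ cs[i+1]? = some '"' then
            goA cs fuel (i+2) inStr (cur ++ ['"']) res d
          else
            goA cs fuel (i+1) inStr (cur ++ [c]) res d
        else
          goA cs fuel (i+1) inStr cur (res ++ [c]) d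
      else res := by
  have fuel_irrel : ∀ (f1 : Nat), ∀ (f2 j : Nat) (b : Bool) (cu re : List Char)
      (dd : PySem.Dict String String), cs.length ≤ j + f1 → cs.length ≤ j + f2 →
      goA cs f1 j b cu re dd = goA cs f2 j b cu re dd := by
    intro f1
    induction f1 with
    | zero =>
      intro f2 j b cu re dd h1 h2
      have hlt : ¬ j < cs.length := by omega
      cases f2 <;> simp [goA, hlt]
    | succ n ih =>
      intro f2 j b cu re dd h1 h2
      cases f2 with
      | zero =>
        have hlt : ¬ j < cs.length := by omega
        simp [goA, hlt]
      | succ m =>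
        simp only [goA]
        by_cases hlt : j < cs.length
        · simp only [hlt, dite_true]
          split_ifs <;>
            first
              | exact ih m (j+1) _ _ _ _ (by omega) (by omega)
              | exact ih m (j+2) _ _ _ _ (by omega) (by omega)
        · simp [hlt]
  by_cases hlt : i < cs.length
  · have hf : ∃ n, fuel = n + 1 := ⟨fuel - 1, by omega⟩
    obtain ⟨n, rfl⟩ := hf
    conv_lhs => rw [goA]
    simp only [hlt, dite_true]
    split_ifs <;>
      first
        | rfl
        | exact fuel_irrel n (n+1) (i+1) _ _ _ _ (by omega) (by omega)
        | exact fuel_irrel n (n+1) (i+2) _ _ _ _ (by omega) (by omega)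
  · cases fuel <;> simp [goA, hlt]

theorem goB_unfold {cs : List Char} {fuel i : Nat} (hk : cs.length ≤ i + fuel)
    (parts : List (List Char)) (d : PySem.Dict String String) :
    goB cs fuel i parts d =
      if nextUQ cs i = -1 then
        (parts ++ [PySem.List.slice cs (some (i : Int)) none]).flatten
      else
        let st := (nextUQ cs i).toNat
        let parts1 := parts ++ [PySem.List.slice cs (some (i : Int)) (some (st : Int))]
        if nextUQ cs (st + 1) = -1 then
          parts1.flatten
        else
          let en := (nextUQ cs (st + 1)).toNat
          let ph := phChars d.size
          let body := PySem.Chars.replace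
            (PySem.List.slice cs (some ((st + 1 : Nat) : Int)) (some ((en : Nat) : Int)))
            ['\\', '"'] ['"']
          goB cs fuel (en + 1) (parts1 ++ [ph]) (d.insert (String.ofList ph) (String.ofList body)) := by
  have fuel_irrel : ∀ (f1 : Nat), ∀ (f2 j : Nat) (ps : List (List Char))
      (dd : PySem.Dict String String), cs.length ≤ j + f1 → cs.length ≤ j + f2 →
      goB cs f1 j ps dd = goB cs f2 j ps dd := by
    intro f1
    induction f1 with
    | zero =>
      intro f2 j ps dd h1 h2
      have hs : nextUQ cs j = -1 := nextUQ_end (by omega)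
      cases f2 <;> simp [goB, hs]
    | succ n ih =>
      intro f2 j ps dd h1 h2
      cases f2 with
      | zero =>
        have hs : nextUQ cs j = -1 := nextUQ_end (by omega)
        simp [goB, hs]
      | succ m =>
        simp only [goB]
        by_cases hs : nextUQ cs j = -1
        · simp [hs]
        · obtain ⟨a, ha, ha1, ha2⟩ := nextUQ_bounds cs.length (by omega) hs
          simp only [hs, dite_false]
          by_cases he : nextUQ cs ((nextUQ cs j).toNat + 1) = -1
          · simp [he]
          · simp only [he, dite_false]
            rw [ha] at he ⊢
            simp only [Int.toNat_natCast] at he ⊢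
            obtain ⟨b, hb, hb1, hb2⟩ := nextUQ_bounds cs.length (by omega) he
            rw [hb]
            simp only [Int.toNat_natCast]
            exact ih m (b+1) _ _ (by omega) (by omega)
  by_cases hs : nextUQ cs i = -1
  · cases fuel <;> simp [goB, hs]
  · obtain ⟨a, ha, ha1, ha2⟩ := nextUQ_bounds cs.length (by omega) hs
    have hf : ∃ n, fuel = n + 1 := ⟨fuel - 1, by omega⟩
    obtain ⟨n, rfl⟩ := hf
    conv_lhs => rw [goB]
    simp only [hs, dite_false, if_false]
    by_cases he : nextUQ cs ((nextUQ cs i).toNat + 1) = -1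
    · simp [he]
    · simp only [he, dite_false, if_false]
      rw [ha] at he ⊢
      simp only [Int.toNat_natCast] at he ⊢
      obtain ⟨b, hb, hb1, hb2⟩ := nextUQ_bounds cs.length (by omega) he
      rw [hb]
      simp only [Int.toNat_natCast]
      exact fuel_irrel n (n+1) (b+1) _ _ (by omega) (by omega)

-- A's in-string escape handling on a closed region: '\"' pairs become '"'
def escScan : List Char → List Char
  | [] => []
  | '\\' :: '"' :: t => '"' :: escScan t
  | c :: t => c :: escScan t

theorem escScan_cons {c : Char} {t : List Char} (h : ¬(c = '\\' ∧ t.head? = some '"')) :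
    escScan (c :: t) = c :: escScan t := by
  rcases t with _ | ⟨d, t⟩
  · rcases eq_or_ne c '\\' with rfl | hc
    · rfl
    · simp [escScan, hc]
  · rcases eq_or_ne c '\\' with rfl | hc
    · rcases eq_or_ne d '"' with rfl | hd
      · simp at h
      · simp [escScan, hd]
    · simp [escScan, hc]

theorem escScan_pair (t : List Char) : escScan ('\\' :: '"' :: t) = '"' :: escScan t := rfl

theorem go_spec : ∀ (fuel : Nat) (l acc : List Char), l.length ≤ fuel →
    PySem.Chars.replace.go ['\\', '"'] ['"'] fuel l acc = acc.reverse ++ escScan l := by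
  intro fuel
  induction fuel with
  | zero => intro l acc h
            have : l = [] := by simpa using h
            subst this; simp [PySem.Chars.replace.go, escScan]
  | succ n ih =>
    intro l acc h
    rcases l with _ | ⟨c, t⟩
    · simp [PySem.Chars.replace.go, escScan]
    · rw [PySem.Chars.replace.go]
      by_cases hp : List.isPrefixOf ['\\', '"'] (c :: t)
      · simp only [hp, if_true]
        rcases t with _ | ⟨d, t'⟩
        · simp [List.isPrefixOf] at hp
        · obtain ⟨rfl, rfl⟩ : '\\' = c ∧ '"' = d := by
            simpa [List.isPrefixOf] using hp
          simp only [List.length_cons, List.drop_succ_cons, List.length_nil,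
            Nat.zero_add, List.drop]
          rw [ih t' _ (by simp at h; omega)]
          simp [escScan_pair]
      · simp only [hp, if_false]
        rw [ih t _ (by simp at h; omega)]
        have hnc : ¬ (c = '\\' ∧ t.head? = some '"') := by
          rintro ⟨rfl, h2⟩
          rcases t with _ | ⟨d, t'⟩ <;> simp at h2
          subst h2
          simp [List.isPrefixOf] at hp
        rw [escScan_cons hnc]
        simp

theorem escScan_eq_replace (l : List Char) :
    PySem.Chars.replace l ['\\', '"'] ['"'] = escScan l := by
  rw [PySem.Chars.replace]
  simpa using go_spec l.length l [] (le_refl _)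

theorem body_eq (cs : List Char) (j e : Nat) :
    PySem.Chars.replace (PySem.List.slice cs (some ((j : Nat) : Int)) (some ((e : Nat) : Int)))
      ['\\', '"'] ['"'] = escScan ((cs.take e).drop j) := by
  rw [escScan_eq_replace]
  congr 1
  rw [PySem.List.slice_natCast, List.drop_take]

theorem slice_cons {cs : List Char} {i e : Nat} (h1 : i < e) (h2 : i < cs.length) :
    PySem.List.slice cs (some ((i : Nat) : Int)) (some ((e : Nat) : Int)) =
      cs[i] :: PySem.List.slice cs (some ((i+1 : Nat) : Int)) (some ((e : Nat) : Int)) := by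
  rw [PySem.List.slice_natCast, PySem.List.slice_natCast,
    show e - i = (e - (i+1)) + 1 by omega, List.drop_eq_getElem_cons h2, List.take_succ_cons]

theorem region_cons {cs : List Char} {j e : Nat} (h1 : j < e) (h2 : e ≤ cs.length) :
    (cs.take e).drop j = cs[j]'(by omega) :: (cs.take e).drop (j+1) := by
  rw [List.drop_eq_getElem_cons (by simp; omega)]
  congr 1
  simp [List.getElem_take]

theorem region_nil {cs : List Char} {j : Nat} : (cs.take j).drop j = [] := by
  apply List.drop_eq_nil_of_le
  simp

-- goB uses `parts` only as a flattened prefix of its output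
theorem goB_flatten (cs : List Char) : ∀ (k fuel i : Nat), cs.length - i ≤ k →
    cs.length ≤ i + fuel →
    ∀ (parts : List (List Char)) (d : PySem.Dict String String),
    goB cs fuel i parts d = parts.flatten ++ goB cs fuel i [] d := by
  intro k
  induction k with
  | zero =>
    intro fuel i hk hfuel parts d
    have hs : nextUQ cs i = -1 := nextUQ_end (by omega)
    rw [goB_unfold hfuel, goB_unfold hfuel]
    simp [hs]
  | succ n ih =>
    intro fuel i hk hfuel parts d
    rw [goB_unfold hfuel, goB_unfold hfuel]
    by_cases hs : nextUQ cs i = -1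
    · simp [hs]
    · obtain ⟨m, hm, hm1, hm2⟩ := nextUQ_bounds cs.length (by omega) hs
      have hmne : ((m : Int)) ≠ -1 := by omega
      simp only [hm, hmne, Int.toNat_natCast, if_false]
      by_cases he : nextUQ cs (m + 1) = -1
      · simp [he]
      · obtain ⟨e', he', he1, he2⟩ := nextUQ_bounds cs.length (by omega) he
        have hene : ((e' : Int)) ≠ -1 := by omega
        simp only [he, he', hene, Int.toNat_natCast, if_false]
        rw [ih fuel (e' + 1) (by omega) (by omega)
            (parts ++ [PySem.List.slice cs (some (i : Int)) (some ((m : Nat) : Int))] ++ [phChars d.size]),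
          ih fuel (e' + 1) (by omega) (by omega)
            ([] ++ [PySem.List.slice cs (some (i : Int)) (some ((m : Nat) : Int))] ++ [phChars d.size])]
        simp

-- A's in-string phase, characterised by the next unescaped quote
theorem insideA (cs : List Char) : ∀ (k fuel j : Nat), cs.length - j ≤ k →
    cs.length ≤ j + fuel →
    ∀ (cur res : List Char) (d : PySem.Dict String String),
    goA cs fuel j true cur res d =
      if nextUQ cs j = -1 then res
      else goA cs fuel ((nextUQ cs j).toNat + 1) false [] (res ++ phChars d.size)
          (d.insert (String.ofList (phChars d.size))
            (String.ofList (cur ++ escScan ((cs.take (nextUQ cs j).toNat).drop j)))) := by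
  intro k
  induction k with
  | zero =>
    intro fuel j hk hfuel cur res d
    have hlt : ¬ j < cs.length := by omega
    rw [goA_unfold hfuel, nextUQ_end hlt]
    simp [hlt]
  | succ n ih =>
    intro fuel j hk hfuel cur res d
    by_cases hlt : j < cs.length
    · rw [goA_unfold hfuel]
      by_cases hc : cs[j] = '"' ∧ (j = 0 ∨ cs[j-1]? ≠ some '\\')
      · -- closing quote
        rw [nextUQ_hit hlt hc]
        simp only [hlt, dite_true, hc, if_true, Int.toNat_natCast]
        have : ((j : Int)) ≠ -1 := by omega
        simp [this, region_nil, escScan]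
      · rw [nextUQ_step hlt hc]
        by_cases hp : cs[j] = '\\' ∧ j + 1 < cs.length ∧ cs[j+1]? = some '"'
        · -- escaped quote pair
          have hstep2 : nextUQ cs (j+1) = nextUQ cs (j+2) := by
            apply nextUQ_step hp.2.1
            rintro ⟨-, h2⟩
            rcases h2 with h2 | h2
            · omega
            · apply h2
              simp only [Nat.add_sub_cancel]
              rw [List.getElem?_eq_getElem hlt, hp.1]
          rw [hstep2]
          simp only [hlt, dite_true, hc, if_false, hp, if_true]
          rw [ih fuel (j+2) (by omega) (by omega)]
          by_cases he : nextUQ cs (j+2) = -1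
          · simp [he]
          · obtain ⟨e, hee, he1, he2⟩ := nextUQ_bounds cs.length (by omega) he
            rw [hee]
            have hne : ((e : Int)) ≠ -1 := by omega
            simp only [hne, if_false, Int.toNat_natCast]
            rw [region_cons (show j < e by omega) (by omega),
                region_cons (show j + 1 < e by omega) (by omega)]
            have hj : cs[j] = '\\' := hp.1
            have hj1 : cs[j+1]'(by omega) = '"' := by
              have := hp.2.2
              rwa [List.getElem?_eq_getElem (by omega), Option.some_inj] at this
            rw [hj, hj1, escScan_pair]
            simp
        · -- ordinary character
          simp only [hlt, dite_true, hc, if_false, hp, if_false]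
          rw [ih fuel (j+1) (by omega) (by omega)]
          by_cases he : nextUQ cs (j+1) = -1
          · simp [he]
          · obtain ⟨e, hee, he1, he2⟩ := nextUQ_bounds cs.length (by omega) he
            rw [hee]
            have hne : ((e : Int)) ≠ -1 := by omega
            simp only [hne, if_false, Int.toNat_natCast]
            rw [region_cons (show j < e by omega) (by omega)]
            rw [escScan_cons]
            · simp
            · rintro ⟨h1, h2⟩
              by_cases hje : j + 1 < e
              · rw [region_cons hje (by omega)] at h2
                simp only [List.head?_cons, Option.some_inj] at h2
                exact hp ⟨h1, by omega, by rw [List.getElem?_eq_getElem (by omega), h2]⟩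
              · rw [show (cs.take e).drop (j+1) = [] from
                  List.drop_eq_nil_of_le (by simp; omega)] at h2
                simp at h2
    · rw [goA_unfold hfuel, nextUQ_end hlt]
      simp [hlt]

theorem outsideA (cs : List Char) : ∀ (k fuel i : Nat), cs.length - i ≤ k →
    cs.length ≤ i + fuel →
    ∀ (cur res : List Char) (d : PySem.Dict String String),
    goA cs fuel i false cur res d = res ++ goB cs fuel i [] d := by
  intro k
  induction k with
  | zero =>
    intro fuel i hk hfuel cur res d
    have hlt : ¬ i < cs.length := by omega
    rw [goA_unfold hfuel, goB_unfold hfuel]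
    simp only [hlt, dite_false, nextUQ_end hlt, if_true]
    rw [PySem.List.slice_from_natCast]
    simp [List.drop_eq_nil_of_le (by omega : cs.length ≤ i)]
  | succ n ih =>
    intro fuel i hk hfuel cur res d
    by_cases hlt : i < cs.length
    · rw [goA_unfold hfuel]
      by_cases hc : cs[i] = '"' ∧ (i = 0 ∨ cs[i-1]? ≠ some '\\')
      · -- opening quote at i
        simp only [hlt, dite_true, hc, if_true, Bool.false_eq_true, if_false]
        rw [insideA cs cs.length fuel (i+1) (by omega) (by omega)]
        rw [goB_unfold hfuel]
        have hi : nextUQ cs i = (i : Int) := nextUQ_hit hlt hc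
        have hine : ((i : Int)) ≠ -1 := by omega
        simp only [hi, hine, if_false, Int.toNat_natCast]
        by_cases he : nextUQ cs (i+1) = -1
        · simp only [he, if_true]
          rw [PySem.List.slice_natCast]
          simp
        · obtain ⟨e, hee, he1, he2⟩ := nextUQ_bounds cs.length (by omega) he
          have hene : ((e : Int)) ≠ -1 := by omega
          rw [hee]
          simp only [hene, if_false, Int.toNat_natCast]
          rw [ih fuel (e+1) (by omega) (by omega), body_eq,
            PySem.List.slice_natCast (a := i) (b := i)]
          rw [goB_flatten cs cs.length fuel (e+1) (by omega) (by omega)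
            ([] ++ [(List.drop i cs).take (i - i)] ++ [phChars d.size])]
          simp
      · -- ordinary character at i
        simp only [hlt, dite_true, hc, if_false, Bool.false_eq_true]
        have hstep : nextUQ cs i = nextUQ cs (i+1) := nextUQ_step hlt hc
        have hrest : goB cs fuel i [] d = cs[i] :: goB cs fuel (i+1) [] d := by
          rw [goB_unfold hfuel, goB_unfold (show cs.length ≤ (i+1) + fuel by omega)]
          simp only [hstep]
          by_cases he : nextUQ cs (i+1) = -1
          · simp only [he, if_true]
            rw [PySem.List.slice_from_natCast, PySem.List.slice_from_natCast]
            simp only [List.nil_append, List.flatten_cons, List.flatten_nil, List.append_nil]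
            rw [List.drop_eq_getElem_cons hlt]
          · obtain ⟨e, hee, he1, he2⟩ := nextUQ_bounds cs.length (by omega) he
            have hene : ((e : Int)) ≠ -1 := by omega
            rw [hee]
            simp only [hene, if_false, Int.toNat_natCast]
            by_cases he2' : nextUQ cs (e+1) = -1
            · simp only [he2', if_true]
              rw [slice_cons (by omega) hlt]
              simp
            · obtain ⟨e2, hee2, he21, he22⟩ := nextUQ_bounds cs.length (by omega) he2'
              have he2ne : ((e2 : Int)) ≠ -1 := by omega
              rw [hee2]
              simp only [he2ne, if_false, Int.toNat_natCast]
              rw [goB_flatten cs cs.length fuel (e2+1) (by omega) (by omega),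
                  goB_flatten cs cs.length fuel (e2+1) (by omega) (by omega)
                    ([] ++ [PySem.List.slice cs (some ((i+1 : Nat) : Int)) (some ((e : Nat) : Int))] ++ [phChars d.size])]
              rw [slice_cons (by omega) hlt]
              simp
        rw [hrest, ih fuel (i+1) (by omega) (by omega)]
        simp
    · rw [goA_unfold hfuel, goB_unfold hfuel]
      simp only [hlt, dite_false, nextUQ_end hlt, if_true]
      rw [PySem.List.slice_from_natCast]
      simp [List.drop_eq_nil_of_le (by omega : cs.length ≤ i)]

-- ===== VERDICT (by name: the statement is the Claim_ definition above) =====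
theorem extract_string_literals_spec : Claim_equal_extract_string_literals := by
  intro text literals_dict _
  unfold Spec_extract_string_literals extract_string_literals extract_string_literals_alt
  rw [outsideA text.toList text.toList.length text.toList.length 0 (by omega) (by omega)]
  simp
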